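-- pv_equiv track=rewrite | github.com/pypi-data/pypi-mirror-369 | packages/zenodotos/zenodotos-0.2.10-py3-none-any.whl/zenodotos/utils.py | validate_file_id
-- ===== SOURCE A (Python) =====
-- from typing import Any, List, Optional
--
-- def validate_file_id(file_id: Any) -> bool:
--     """Validate if a string looks like a valid Google Drive file ID.
--
--     Args:
--         file_id: The file ID to validate
--
--     Returns:
--         True if the file ID appears valid, False otherwise
--     """
--     if not file_id or not isinstance(file_id, str):
--         return False
--
--     # Google Drive file IDs are typically 33-44 characters long
--     # and contain alphanumeric characters, hyphens, and underscores
--     if len(file_id) < 10 or len(file_id) > 50: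
--         return False
--
--     # Check if it contains only valid characters
--     valid_chars = set(
--         "abcdefghijklmnopqrstuvwxyzABCDEFGHIJKLMNOPQRSTUVWXYZ0123456789-_"
--     )
--     return all(c in valid_chars for c in file_id)
-- ===== SOURCE B (Python) =====
-- import re
--
-- _FILE_ID_RE = re.compile(r"[A-Za-z0-9_-]{10,50}")
--
--
-- def validate_file_id(file_id):
--     """Validate if a string looks like a valid Google Drive file ID."""
--     if not file_id or not isinstance(file_id, str):
--         return False
--     return _FILE_ID_RE.fullmatch(file_id) is not None
-- ===== Notes on version B (the rewrite author's own statement) =====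
-- stated objective: idiomatic
-- what changed: Replaces A's explicit length bounds check plus per-character membership scan over a precomputed set with a single anchored regex fullmatch of [A-Za-z0-9_-]{10,50}.
import Mathlib
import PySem

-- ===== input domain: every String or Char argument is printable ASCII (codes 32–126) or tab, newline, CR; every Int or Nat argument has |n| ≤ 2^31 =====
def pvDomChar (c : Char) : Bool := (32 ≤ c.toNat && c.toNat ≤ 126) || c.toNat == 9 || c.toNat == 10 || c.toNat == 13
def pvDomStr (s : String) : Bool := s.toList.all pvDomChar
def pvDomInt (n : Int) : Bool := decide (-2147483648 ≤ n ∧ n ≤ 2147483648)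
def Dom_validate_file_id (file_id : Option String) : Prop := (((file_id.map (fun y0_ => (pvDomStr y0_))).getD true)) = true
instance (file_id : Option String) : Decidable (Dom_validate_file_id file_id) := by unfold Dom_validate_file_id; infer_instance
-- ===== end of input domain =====

-- B replaces A's explicit length test plus per-character set-membership scan by a single
-- anchored regex fullmatch r"[A-Za-z0-9_-]{10,50}" (objective: idiomatic; same cost).

set_option maxRecDepth 10000

-- ===== PORT A =====
-- A's 'valid_chars = set("…")'
def validCharsA : PySem.Set Char :=
  PySem.Set.ofList "abcdefghijklmnopqrstuvwxyzABCDEFGHIJKLMNOPQRSTUVWXYZ0123456789-_".toList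

def validate_file_id (file_id : Option String) : Bool :=
  match file_id with
  | none => false                                   -- 'not file_id or not isinstance(file_id, str)'
  | some s =>
    if s.toList.length = 0 then false               -- empty string is falsy
    else if s.toList.length < 10 ∨ s.toList.length > 50 then false
    else s.toList.all (fun c => validCharsA.contains c)   -- all(c in valid_chars for c in file_id)

-- ===== PORT B =====
-- the character class [A-Za-z0-9_-] of B's regex
def idChar (c : Char) : Bool :=
  ('A' ≤ c && c ≤ 'Z') || ('a' ≤ c && c ≤ 'z') || ('0' ≤ c && c ≤ '9') || c == '_' || c == '-'

-- re.fullmatch(r"[A-Za-z0-9_-]{10,50}", s) is not None, ported exactly by its meaning: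
-- the whole string is 10–50 characters, each in the class
def fullmatchIdRe (cs : List Char) : Bool :=
  (10 ≤ cs.length && cs.length ≤ 50) && cs.all idChar

def validate_file_id_alt (file_id : Option String) : Bool :=
  match file_id with
  | none => false                                   -- 'not file_id or not isinstance(file_id, str)'
  | some s =>
    if s.toList.isEmpty then false                  -- empty string is falsy
    else fullmatchIdRe s.toList

-- ===== PRECONDITION & SPEC =====
def Spec_validate_file_id (file_id : Option String) (out : Bool) : Prop := out = validate_file_id_alt file_id
instance (file_id : Option String) (out : Bool) : Decidable (Spec_validate_file_id file_id out) := by unfold Spec_validate_file_id; infer_instance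

-- ===== CLAIM (what is proved, stated in full; the proofs are below) =====
def Claim_equal_validate_file_id : Prop := ∀ (file_id : Option String), Dom_validate_file_id file_id → Spec_validate_file_id file_id (validate_file_id file_id)

-- ===== LEMMAS AND PROOFS =====
theorem validCharsA_lit : validCharsA = ['a', 'b', 'c', 'd', 'e', 'f', 'g', 'h', 'i', 'j', 'k', 'l', 'm', 'n', 'o', 'p', 'q', 'r', 's', 't', 'u', 'v', 'w', 'x', 'y', 'z', 'A', 'B', 'C', 'D', 'E', 'F', 'G', 'H', 'I', 'J', 'K', 'L', 'M', 'N', 'O', 'P', 'Q', 'R', 'S', 'T', 'U', 'V', 'W', 'X', 'Y', 'Z', '0', '1', '2', '3', '4', '5', '6', '7', '8', '9', '-', '_'] := by decide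

theorem char_eq_iff (c d : Char) : (c = d) ↔ c.toNat = d.toNat :=
  ⟨by rintro rfl; rfl, fun h => by rw [← Char.ofNat_toNat c, h, Char.ofNat_toNat]⟩

theorem char_le_iff (c d : Char) : (c ≤ d) ↔ c.toNat ≤ d.toNat := by
  rw [Char.le_def, UInt32.le_iff_toNat_le]; rfl

theorem pred_eq (c : Char) : validCharsA.contains c = idChar c := by
  rw [validCharsA_lit]
  rw [Bool.eq_iff_iff]
  simp only [idChar, PySem.Set.contains, List.contains_cons, List.contains_nil,
    Bool.or_eq_true, Bool.and_eq_true, beq_iff_eq, decide_eq_true_eq]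
  simp only [char_eq_iff, char_le_iff]
  simp
  omega

-- ===== VERDICT (by name: the statement is the Claim_ definition above) =====
theorem validate_file_id_spec : Claim_equal_validate_file_id := by
  intro file_id _
  unfold Spec_validate_file_id validate_file_id validate_file_id_alt
  cases file_id with
  | none => rfl
  | some s =>
    simp only [fullmatchIdRe, List.isEmpty_iff, List.length_eq_zero_iff]
    by_cases h0 : s.toList = []
    · simp [h0]
    · simp only [h0, if_false]
      by_cases hlen : s.toList.length < 10 ∨ s.toList.length > 50
      · have : ¬ (10 ≤ s.toList.length && s.toList.length ≤ 50) = true := by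
          have hL : s.toList.length = s.length := String.length_toList
          simp only [Bool.and_eq_true, decide_eq_true_eq, not_and, not_le]
          omega
        simp only [if_pos hlen]
        cases hb : ((10 ≤ s.toList.length && s.toList.length ≤ 50) && s.toList.all idChar) with
        | false => rfl
        | true => exact absurd (by exact (Bool.and_eq_true _ _ ▸ hb).1) this
      · have hband : (decide (10 ≤ s.toList.length) && decide (s.toList.length ≤ 50)) = true := by
          have hL : s.toList.length = s.length := String.length_toList
          simp only [Bool.and_eq_true, decide_eq_true_eq]
          omega
        simp only [if_neg hlen, hband, Bool.true_and]
        rw [funext pred_eq]
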